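-- pv_equiv track=rewrite | github.com/Kawser-nerd/CLCDSA | Source Codes/AtCoder/agc023/C/2713408.py | solve
-- ===== SOURCE A (Python) =====
-- def prepare(n, MOD):
--     f = 1
--     factorials = [1]
--     for m in range(1, n + 1):
--         f *= m
--         f %= MOD
--         factorials.append(f)
--     inv = pow(f, MOD - 2, MOD)
--     inverses = [1] * (n + 1)
--     inverses[n] = inv
--     for m in range(n, 1, -1):
--         inv *= m
--         inv %= MOD
--         inverses[m - 1] = inv
--     return factorials, inverses
--
-- def solve(n):
--     MOD = 1000000007
--     fac, inv = prepare(n, MOD)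
--     ans = 0
--     cnt = 0
--     for k in range((n + 1) // 2, n):
--         tmp = fac[k - 1] * inv[n - 1 - k] * inv[2 * k - n]
--         tmp %= MOD
--         tmp *= fac[k]
--         tmp %= MOD
--         tmp *= fac[n - 1 - k]
--         tmp %= MOD
--         just = (tmp - cnt) % MOD
--         ans += just * k
--         ans %= MOD
--         cnt = tmp
--     return ans
-- ===== SOURCE B (Python) =====
-- def prepare(n, MOD):
--     f = 1
--     factorials = [1]
--     for m in range(1, n + 1):
--         f *= m
--         f %= MOD
--         factorials.append(f)
--     inv = pow(f, MOD - 2, MOD)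
--     inverses = [1] * (n + 1)
--     inverses[n] = inv
--     for m in range(n, 1, -1):
--         inv *= m
--         inv %= MOD
--         inverses[m - 1] = inv
--     return factorials, inverses
--
-- def solve(n):
--     # summation by parts: sum_k (a_k - a_{k-1})*k = (n-1)*a_last - sum of earlier a_k
--     MOD = 1000000007
--     fac, inv = prepare(n, MOD)
--     total = 0
--     last = 0
--     seen = False
--     for k in range((n + 1) // 2, n):
--         tmp = fac[k - 1] * inv[n - 1 - k] % MOD * fac[k] % MOD * fac[n - 1 - k] % MOD * inv[2 * k - n] % MOD
--         total = (total + tmp) % MOD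
--         last = tmp
--         seen = True
--     if not seen:
--         return 0
--     return ((n - 1) * last - (total - last)) % MOD
-- ===== Notes on version B (the rewrite author's own statement) =====
-- stated objective: alternative
-- what changed: solve's loop no longer tracks the previous term and a running telescoping difference; B accumulates the plain sum of the terms and their last value and returns the summation-by-parts closed form ((n-1)*last - (sum - last)) % MOD (prepare is unchanged).
import Mathlib
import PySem

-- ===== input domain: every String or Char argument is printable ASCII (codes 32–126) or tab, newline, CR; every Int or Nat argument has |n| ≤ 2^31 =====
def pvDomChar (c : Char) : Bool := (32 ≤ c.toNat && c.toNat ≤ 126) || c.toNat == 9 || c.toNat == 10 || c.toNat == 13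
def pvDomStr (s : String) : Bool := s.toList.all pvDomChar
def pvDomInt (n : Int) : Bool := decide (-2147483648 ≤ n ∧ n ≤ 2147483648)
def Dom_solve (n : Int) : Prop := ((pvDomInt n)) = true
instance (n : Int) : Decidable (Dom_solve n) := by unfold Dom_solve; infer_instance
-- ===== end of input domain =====

-- B replaces A's running telescoping difference (ans += (a_k - a_prev)*k) by summation by
-- parts: it accumulates the plain sum of the terms and their last value and returns
-- (n-1)*last - (sum - last) mod p; the factorial-table helper `prepare` is unchanged and shared.

-- ===== PORT A =====
-- shared helper: Python's pow(b, e, m) for m > 0. (PySem.Int.powMod computes b ^ e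
-- before reducing, which is infeasible for e ≈ 10^9; this computes the same value,
-- b ^ e mod m, by binary exponentiation. Exact for m > 0, the only way it is called.)
def powMod3 (b : Int) (e : Nat) (m : Int) : Int :=
  if e = 0 then PySem.Int.mod 1 m
  else
    let h := powMod3 b (e / 2) m
    let h2 := PySem.Int.mod (h * h) m
    if e % 2 = 1 then PySem.Int.mod (h2 * b) m else h2
termination_by e
decreasing_by exact Nat.div_lt_self (Nat.pos_of_ne_zero (by assumption)) (by norm_num)

-- shared helper: literal port of `prepare` (identical in Source A and Source B).
-- Python lists are dynamic arrays, so `factorials.append(f)` is Array.push and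
-- `inverses[i] = v` is Array.set! on the .toNat index: exact for 0 ≤ n (the only
-- case Pre_solve admits; on negative n Python raises IndexError).
def prepare (n : Int) (MOD : Int) : List Int × List Int :=
  let st := (PySem.List.pyRange 1 (n + 1) 1).foldl
    (fun (st : Int × Array Int) m =>
      let f := PySem.Int.mod (st.1 * m) MOD
      (f, st.2.push f)) (1, #[1])
  let inv0 := powMod3 st.1 (MOD - 2).toNat MOD
  let inverses := (Array.replicate (n + 1).toNat 1).set! n.toNat inv0
  let st2 := (PySem.List.pyRange n 1 (-1)).foldl
    (fun (st : Int × Array Int) m =>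
      let inv := PySem.Int.mod (st.1 * m) MOD
      (inv, st.2.set! (m - 1).toNat inv)) (inv0, inverses)
  (st.2.toList, st2.2.toList)

def solve (n : Int) : Int :=
  let MOD : Int := 1000000007
  let p := prepare n MOD
  let st := (PySem.List.pyRange (PySem.Int.floordiv (n + 1) 2) n 1).foldl
    (fun (st : Int × Int) k =>
      let tmp := PySem.Int.mod (PySem.List.pyGetD p.1 (k - 1) 0 * PySem.List.pyGetD p.2 (n - 1 - k) 0 * PySem.List.pyGetD p.2 (2 * k - n) 0) MOD
      let tmp := PySem.Int.mod (tmp * PySem.List.pyGetD p.1 k 0) MOD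
      let tmp := PySem.Int.mod (tmp * PySem.List.pyGetD p.1 (n - 1 - k) 0) MOD
      let just := PySem.Int.mod (tmp - st.2) MOD
      (PySem.Int.mod (st.1 + just * k) MOD, tmp)) (0, 0)
  st.1

-- ===== PORT B =====
def solve_alt (n : Int) : Int :=
  let MOD : Int := 1000000007
  let p := prepare n MOD
  let st := (PySem.List.pyRange (PySem.Int.floordiv (n + 1) 2) n 1).foldl
    (fun (st : Int × Int × Bool) k =>
      let tmp := PySem.Int.mod (PySem.Int.mod (PySem.Int.mod (PySem.Int.mod (PySem.List.pyGetD p.1 (k - 1) 0 * PySem.List.pyGetD p.2 (n - 1 - k) 0) MOD * PySem.List.pyGetD p.1 k 0) MOD * PySem.List.pyGetD p.1 (n - 1 - k) 0) MOD * PySem.List.pyGetD p.2 (2 * k - n) 0) MOD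
      (PySem.Int.mod (st.1 + tmp) MOD, tmp, true)) (0, 0, false)
  if st.2.2 then PySem.Int.mod ((n - 1) * st.2.1 - (st.1 - st.2.1)) MOD else 0

-- ===== PRECONDITION & SPEC =====
-- Pre_ excludes negative n, on which A (and B) raises IndexError at `inverses[n] = inv`.
def Pre_solve (n : Int) : Prop := 0 ≤ n
instance (n : Int) : Decidable (Pre_solve n) := by unfold Pre_solve; infer_instance
def pvWitness_solve : Int := 5

def Spec_solve (n : Int) (out : Int) : Prop := out = solve_alt n
instance (n : Int) (out : Int) : Decidable (Spec_solve n out) := by unfold Spec_solve; infer_instance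

-- ===== CLAIM (what is proved, stated in full; the proofs are below) =====
def Claim_equal_solve : Prop := ∀ (n : Int), Dom_solve n → Pre_solve n → Spec_solve n (solve n)

-- ===== LEMMAS AND PROOFS =====

-- abstract loop bodies of the two ports (f is the per-k term)
def stepA (M : Int) (f : Int → Int) (st : Int × Int) (k : Int) : Int × Int :=
  (PySem.Int.mod (st.1 + PySem.Int.mod (f k - st.2) M * k) M, f k)

def stepB (M : Int) (f : Int → Int) (st : Int × Int × Bool) (k : Int) : Int × Int × Bool :=
  (PySem.Int.mod (st.1 + f k) M, f k, true)

-- the common term a_k, in A's association order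
def tmpF (n : Int) (fac inv : List Int) (k : Int) : Int :=
  PySem.Int.mod (PySem.Int.mod (PySem.Int.mod (PySem.List.pyGetD fac (k - 1) 0 * PySem.List.pyGetD inv (n - 1 - k) 0 * PySem.List.pyGetD inv (2 * k - n) 0) 1000000007 * PySem.List.pyGetD fac k 0) 1000000007 * PySem.List.pyGetD fac (n - 1 - k) 0) 1000000007

lemma tmpF_emod (n : Int) (fac inv : List Int) (k : Int) :
    tmpF n fac inv k % 1000000007 = tmpF n fac inv k := by
  rw [tmpF, PySem.Int.mod_eq_emod_of_pos (by norm_num : (0:Int) < 1000000007)]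
  exact Int.emod_emod_of_dvd _ dvd_rfl

-- B's association order of the product reduces to the same value
lemma tmpB_eq_tmpF (n : Int) (fac inv : List Int) (k : Int) :
    PySem.Int.mod (PySem.Int.mod (PySem.Int.mod (PySem.Int.mod (PySem.List.pyGetD fac (k - 1) 0 * PySem.List.pyGetD inv (n - 1 - k) 0) 1000000007 * PySem.List.pyGetD fac k 0) 1000000007 * PySem.List.pyGetD fac (n - 1 - k) 0) 1000000007 * PySem.List.pyGetD inv (2 * k - n) 0) 1000000007
      = tmpF n fac inv k := by
  have hM : (0:Int) < 1000000007 := by norm_num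
  simp only [tmpF, PySem.Int.mod_eq_emod_of_pos hM]
  set a := PySem.List.pyGetD fac (k - 1) 0
  set b := PySem.List.pyGetD inv (n - 1 - k) 0
  set c := PySem.List.pyGetD fac k 0
  set d := PySem.List.pyGetD fac (n - 1 - k) 0
  set e := PySem.List.pyGetD inv (2 * k - n) 0
  have m1 : ∀ x c : Int, x % 1000000007 * c ≡ x * c [ZMOD 1000000007] :=
    fun x c => (Int.mod_modEq x _).mul_right c
  have h1 : (a * b) % 1000000007 * c % 1000000007 * d % 1000000007 * e ≡ a * b * c * d * e [ZMOD 1000000007] := by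
    calc (a * b) % 1000000007 * c % 1000000007 * d % 1000000007 * e
        ≡ (a * b) % 1000000007 * c % 1000000007 * d * e [ZMOD 1000000007] := m1 _ e
      _ ≡ (a * b) % 1000000007 * c * d * e [ZMOD 1000000007] := (m1 _ d).mul_right e
      _ ≡ a * b * c * d * e [ZMOD 1000000007] := ((m1 (a * b) c).mul_right d).mul_right e
  have h2 : (a * b * e) % 1000000007 * c % 1000000007 * d ≡ a * b * e * c * d [ZMOD 1000000007] := by
    calc (a * b * e) % 1000000007 * c % 1000000007 * d
        ≡ (a * b * e) % 1000000007 * c * d [ZMOD 1000000007] := m1 _ d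
      _ ≡ a * b * e * c * d [ZMOD 1000000007] := (m1 (a * b * e) c).mul_right d
  have : a * b * c * d * e = a * b * e * c * d := by ring
  exact h1.trans (this ▸ h2.symm)

-- stepB never reads or clears the seen flag
lemma foldl_stepB_seen (M : Int) (f : Int → Int) :
    ∀ (ks : List Int) (st : Int × Int × Bool), st.2.2 = true →
      (ks.foldl (stepB M f) st).2.2 = true := by
  intro ks
  induction ks with
  | nil => intro st h; exact h
  | cons k ks ih => intro st _; exact ih _ rfl

-- the linking invariant: A's running answer equals (j·last − (sum − last)) mod M,
-- where j is the last processed index; folding the remaining consecutive run preserves it.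
lemma loop_link (f : Int → Int) :
    ∀ (len : Nat) (j ans total last : Int) (sn : Bool),
      ans % 1000000007 = ans →
      ans % 1000000007 = (j * last - (total - last)) % 1000000007 →
      ((PySem.List.pyRange (j + 1) (j + 1 + len) 1).foldl (stepA 1000000007 f) (ans, last)).1
        = ((j + len) *
            ((PySem.List.pyRange (j + 1) (j + 1 + len) 1).foldl (stepB 1000000007 f) (total, last, sn)).2.1
          - (((PySem.List.pyRange (j + 1) (j + 1 + len) 1).foldl (stepB 1000000007 f) (total, last, sn)).1
            - ((PySem.List.pyRange (j + 1) (j + 1 + len) 1).foldl (stepB 1000000007 f) (total, last, sn)).2.1))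
          % 1000000007 := by
  have hM : (0:Int) < 1000000007 := by norm_num
  intro len
  induction len with
  | zero =>
    intro j ans total last sn h1 h2
    rw [PySem.List.pyRange_one_eq_nil (by push_cast; omega)]
    simpa using h1 ▸ h2
  | succ len ih =>
    intro j ans total last sn h1 h2
    have hlt : j + 1 < j + 1 + ((len:Int) + 1) := by omega
    rw [show ((len + 1 : Nat) : Int) = (len : Int) + 1 by push_cast; ring] at *
    rw [PySem.List.pyRange_one_cons hlt]
    simp only [List.foldl_cons]
    have hb : j + 1 + ((len:Int) + 1) = (j + 1) + 1 + len := by ring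
    rw [hb]
    have hstepA : stepA 1000000007 f (ans, last) (j + 1)
        = ((ans + (f (j + 1) - last) % 1000000007 * (j + 1)) % 1000000007, f (j + 1)) := by
      simp [stepA]
    have hstepB : stepB 1000000007 f (total, last, sn) (j + 1)
        = ((total + f (j + 1)) % 1000000007, f (j + 1), true) := by
      simp [stepB]
    rw [hstepA, hstepB]
    have h2' : (ans + (f (j + 1) - last) % 1000000007 * (j + 1)) % 1000000007 % 1000000007
        = ((j + 1) * f (j + 1) - ((total + f (j + 1)) % 1000000007 - f (j + 1))) % 1000000007 := by
      have e1 : ans + (f (j + 1) - last) % 1000000007 * (j + 1)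
          ≡ (j * last - (total - last)) + (f (j + 1) - last) * (j + 1) [ZMOD 1000000007] := by
        have ha : ans ≡ j * last - (total - last) [ZMOD 1000000007] := h1 ▸ h2
        exact ha.add ((Int.mod_modEq _ _).mul_right _)
      have e2 : (j + 1) * f (j + 1) - ((total + f (j + 1)) % 1000000007 - f (j + 1))
          ≡ (j + 1) * f (j + 1) - ((total + f (j + 1)) - f (j + 1)) [ZMOD 1000000007] :=
        Int.ModEq.sub_left _ ((Int.mod_modEq _ _).sub_right _)
      have e3 : (j * last - (total - last)) + (f (j + 1) - last) * (j + 1)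
          = (j + 1) * f (j + 1) - ((total + f (j + 1)) - f (j + 1)) := by ring
      calc (ans + (f (j + 1) - last) % 1000000007 * (j + 1)) % 1000000007 % 1000000007
          = (ans + (f (j + 1) - last) % 1000000007 * (j + 1)) % 1000000007 :=
            Int.emod_emod_of_dvd _ dvd_rfl
        _ = ((j * last - (total - last)) + (f (j + 1) - last) * (j + 1)) % 1000000007 := e1
        _ = ((j + 1) * f (j + 1) - ((total + f (j + 1)) - f (j + 1))) % 1000000007 := by rw [e3]
        _ = ((j + 1) * f (j + 1) - ((total + f (j + 1)) % 1000000007 - f (j + 1))) % 1000000007 :=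
            e2.symm
    have := ih (j + 1) ((ans + (f (j + 1) - last) % 1000000007 * (j + 1)) % 1000000007)
      ((total + f (j + 1)) % 1000000007) (f (j + 1)) true
      (Int.emod_emod_of_dvd _ dvd_rfl) h2'
    rw [show (j + 1) + (len:Int) = j + ((len:Int) + 1) by ring] at this
    exact this

-- ===== VERDICT (by name: the statement is the Claim_ definition above) =====
theorem solve_spec : Claim_equal_solve := by
  intro n _hdom hpre
  show solve n = solve_alt n
  have hM : (0:Int) < 1000000007 := by norm_num
  set p := prepare n 1000000007 with hp
  set f := tmpF n p.1 p.2 with hf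
  set s := PySem.Int.floordiv (n + 1) 2 with hs
  have hA : solve n = ((PySem.List.pyRange s n 1).foldl (stepA 1000000007 f) (0, 0)).1 := rfl
  have hBfun : (fun (st : Int × Int × Bool) k =>
      let tmp := PySem.Int.mod (PySem.Int.mod (PySem.Int.mod (PySem.Int.mod (PySem.List.pyGetD p.1 (k - 1) 0 * PySem.List.pyGetD p.2 (n - 1 - k) 0) 1000000007 * PySem.List.pyGetD p.1 k 0) 1000000007 * PySem.List.pyGetD p.1 (n - 1 - k) 0) 1000000007 * PySem.List.pyGetD p.2 (2 * k - n) 0) 1000000007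
      (PySem.Int.mod (st.1 + tmp) 1000000007, tmp, true)) = stepB 1000000007 f := by
    funext st k
    simp only [stepB, hf, tmpB_eq_tmpF]
  have hB : solve_alt n =
      (if ((PySem.List.pyRange s n 1).foldl (stepB 1000000007 f) (0, 0, false)).2.2 then
        PySem.Int.mod ((n - 1) * ((PySem.List.pyRange s n 1).foldl (stepB 1000000007 f) (0, 0, false)).2.1
          - (((PySem.List.pyRange s n 1).foldl (stepB 1000000007 f) (0, 0, false)).1
            - ((PySem.List.pyRange s n 1).foldl (stepB 1000000007 f) (0, 0, false)).2.1)) 1000000007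
      else 0) := by
    rw [show solve_alt n =
      (if ((PySem.List.pyRange s n 1).foldl (fun (st : Int × Int × Bool) k =>
        let tmp := PySem.Int.mod (PySem.Int.mod (PySem.Int.mod (PySem.Int.mod (PySem.List.pyGetD p.1 (k - 1) 0 * PySem.List.pyGetD p.2 (n - 1 - k) 0) 1000000007 * PySem.List.pyGetD p.1 k 0) 1000000007 * PySem.List.pyGetD p.1 (n - 1 - k) 0) 1000000007 * PySem.List.pyGetD p.2 (2 * k - n) 0) 1000000007
        (PySem.Int.mod (st.1 + tmp) 1000000007, tmp, true)) (0, 0, false)).2.2 then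
        PySem.Int.mod ((n - 1) * ((PySem.List.pyRange s n 1).foldl (fun (st : Int × Int × Bool) k =>
        let tmp := PySem.Int.mod (PySem.Int.mod (PySem.Int.mod (PySem.Int.mod (PySem.List.pyGetD p.1 (k - 1) 0 * PySem.List.pyGetD p.2 (n - 1 - k) 0) 1000000007 * PySem.List.pyGetD p.1 k 0) 1000000007 * PySem.List.pyGetD p.1 (n - 1 - k) 0) 1000000007 * PySem.List.pyGetD p.2 (2 * k - n) 0) 1000000007
        (PySem.Int.mod (st.1 + tmp) 1000000007, tmp, true)) (0, 0, false)).2.1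
          - (((PySem.List.pyRange s n 1).foldl (fun (st : Int × Int × Bool) k =>
        let tmp := PySem.Int.mod (PySem.Int.mod (PySem.Int.mod (PySem.Int.mod (PySem.List.pyGetD p.1 (k - 1) 0 * PySem.List.pyGetD p.2 (n - 1 - k) 0) 1000000007 * PySem.List.pyGetD p.1 k 0) 1000000007 * PySem.List.pyGetD p.1 (n - 1 - k) 0) 1000000007 * PySem.List.pyGetD p.2 (2 * k - n) 0) 1000000007
        (PySem.Int.mod (st.1 + tmp) 1000000007, tmp, true)) (0, 0, false)).1
            - ((PySem.List.pyRange s n 1).foldl (fun (st : Int × Int × Bool) k =>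
        let tmp := PySem.Int.mod (PySem.Int.mod (PySem.Int.mod (PySem.Int.mod (PySem.List.pyGetD p.1 (k - 1) 0 * PySem.List.pyGetD p.2 (n - 1 - k) 0) 1000000007 * PySem.List.pyGetD p.1 k 0) 1000000007 * PySem.List.pyGetD p.1 (n - 1 - k) 0) 1000000007 * PySem.List.pyGetD p.2 (2 * k - n) 0) 1000000007
        (PySem.Int.mod (st.1 + tmp) 1000000007, tmp, true)) (0, 0, false)).2.1)) 1000000007
      else 0) from rfl]
    rw [hBfun]
  by_cases hempty : n ≤ s
  · rw [hA, hB, PySem.List.pyRange_one_eq_nil hempty]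
    simp
  · replace hempty : s < n := lt_of_not_ge fun h => hempty h
    rw [hA, hB, PySem.List.pyRange_one_cons hempty]
    simp only [List.foldl_cons]
    have hseen : ((PySem.List.pyRange (s + 1) n 1).foldl (stepB 1000000007 f)
        (stepB 1000000007 f (0, 0, false) s)).2.2 = true :=
      foldl_stepB_seen _ _ _ _ rfl
    rw [hseen]; simp only [if_true]
    have hmodf : f s % 1000000007 = f s := by rw [hf]; exact tmpF_emod n p.1 p.2 s
    have hstepA : stepA 1000000007 f (0, 0) s = ((f s * s) % 1000000007, f s) := by
      simp only [stepA, PySem.Int.mod_eq_emod_of_pos hM, sub_zero, zero_add, hmodf]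
    have hstepB : stepB 1000000007 f (0, 0, false) s = (f s, f s, true) := by
      simp only [stepB, PySem.Int.mod_eq_emod_of_pos hM, zero_add, hmodf]
    rw [hstepA, hstepB]
    have hlen : s + 1 + ((n - (s + 1)).toNat : Int) = n := by
      rw [Int.toNat_of_nonneg (by omega)]; ring
    have h2 : (f s * s) % 1000000007 % 1000000007
        = (s * f s - (f s - f s)) % 1000000007 := by
      rw [Int.emod_emod_of_dvd _ dvd_rfl, show s * f s - (f s - f s) = f s * s by ring]
    have key := loop_link f (n - (s + 1)).toNat s ((f s * s) % 1000000007) (f s) (f s) true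
      (Int.emod_emod_of_dvd _ dvd_rfl) h2
    rw [hlen] at key
    rw [show s + ((n - (s + 1)).toNat : Int) = n - 1 by
      rw [Int.toNat_of_nonneg (by omega)]; ring] at key
    rw [PySem.Int.mod_eq_emod_of_pos hM]
    exact key
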